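-- pv_equiv track=rewrite | github.com/owain-Biddulph/deep-ail | alphabeta.py | remove_illegal_moves
-- ===== SOURCE A (Python) =====
-- from typing import List, Tuple
--
-- def remove_illegal_moves(moves: List[List[Tuple]]) -> List[List[Tuple[int, int, int, int, int]]]:
--     """ This function removes the illegal moves from the list of possible moves.
--
--     Illegal moves are defined by the game rules.
--     :param moves: List of possible moves
--     :return: List of legal moves
--     """
--     legal_moves = []
--     for move in moves:
--         if len(move) == 1:
--             legal_moves.append(move)
--         else:
--             c = 0
--             for m1 in move:
--                 for m2 in move:
--                     if m1[:2] == m2[3:]: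
--                         c += 1
--                         break
--             if c == 0:
--                 legal_moves.append(move)
--     return legal_moves
-- ===== SOURCE B (Python) =====
-- def _legal(move):
--     if len(move) == 1:
--         return True
--     prefixes = {m[:2] for m in move}
--     suffixes = {m[3:] for m in move}
--     return prefixes.isdisjoint(suffixes)
--
-- def remove_illegal_moves(moves):
--     return [move for move in moves if _legal(move)]
-- ===== Notes on version B (the rewrite author's own statement) =====
-- stated objective: faster
-- what changed: Replaces the O(k^2) nested pair-scan with counter and break by building prefix and suffix sets once per group and testing set disjointness, and replaces the accumulator loop by a filter comprehension.
import Mathlib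
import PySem

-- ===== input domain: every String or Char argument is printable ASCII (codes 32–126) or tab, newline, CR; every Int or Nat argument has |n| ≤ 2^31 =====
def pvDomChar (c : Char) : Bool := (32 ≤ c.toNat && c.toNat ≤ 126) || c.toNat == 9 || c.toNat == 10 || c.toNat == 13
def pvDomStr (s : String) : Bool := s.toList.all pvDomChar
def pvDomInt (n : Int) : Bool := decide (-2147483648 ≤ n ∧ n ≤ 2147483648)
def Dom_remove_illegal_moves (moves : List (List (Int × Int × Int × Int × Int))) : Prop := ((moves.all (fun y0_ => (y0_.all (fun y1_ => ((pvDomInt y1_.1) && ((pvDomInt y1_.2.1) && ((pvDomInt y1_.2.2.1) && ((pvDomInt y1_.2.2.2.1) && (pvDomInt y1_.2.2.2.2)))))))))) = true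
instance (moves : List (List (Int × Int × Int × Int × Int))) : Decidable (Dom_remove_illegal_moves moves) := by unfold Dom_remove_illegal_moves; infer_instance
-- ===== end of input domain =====

-- B replaces A's nested pair-scan with a per-group prefix-set / suffix-set disjointness test
-- and a filter comprehension instead of an accumulator loop (simpler; return value only).

-- m[:2] of a 5-tuple
def pvPre (m : Int × Int × Int × Int × Int) : Int × Int := (m.1, m.2.1)
-- m[3:] of a 5-tuple
def pvSuf (m : Int × Int × Int × Int × Int) : Int × Int := (m.2.2.2.1, m.2.2.2.2)

-- ===== PORT A =====
def remove_illegal_moves (moves : List (List (Int × Int × Int × Int × Int))) : List (List (Int × Int × Int × Int × Int)) :=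
  moves.foldl (fun legal_moves move =>
    if move.length == 1 then legal_moves ++ [move]
    else
      -- inner double loop with break: c increments once per m1 that finds some matching m2
      let c : Int := move.foldl (fun c m1 =>
        if move.any (fun m2 => pvPre m1 == pvSuf m2) then c + 1 else c) 0
      if c == 0 then legal_moves ++ [move] else legal_moves) []

-- ===== PORT B =====
def pvLegal (move : List (Int × Int × Int × Int × Int)) : Bool :=
  if move.length == 1 then true
  else PySem.Set.isdisjoint (PySem.Set.ofList (move.map pvPre)) (PySem.Set.ofList (move.map pvSuf))

def remove_illegal_moves_alt (moves : List (List (Int × Int × Int × Int × Int))) : List (List (Int × Int × Int × Int × Int)) :=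
  moves.filter pvLegal

-- ===== PRECONDITION & SPEC =====
def Spec_remove_illegal_moves (moves : List (List (Int × Int × Int × Int × Int))) (out : List (List (Int × Int × Int × Int × Int))) : Prop := out = remove_illegal_moves_alt moves
instance (moves : List (List (Int × Int × Int × Int × Int))) (out : List (List (Int × Int × Int × Int × Int))) : Decidable (Spec_remove_illegal_moves moves out) := by unfold Spec_remove_illegal_moves; infer_instance

-- ===== CLAIM (what is proved, stated in full; the proofs are below) =====
def Claim_equal_remove_illegal_moves : Prop := ∀ (moves : List (List (Int × Int × Int × Int × Int))), Dom_remove_illegal_moves moves → Spec_remove_illegal_moves moves (remove_illegal_moves moves)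

-- ===== LEMMAS AND PROOFS =====

-- A's counting loop computes the number of m1 with a matching m2
lemma pv_count_foldl (p : (Int × Int × Int × Int × Int) → Bool)
    (move : List (Int × Int × Int × Int × Int)) (n : Int) :
    move.foldl (fun c m1 => if p m1 then c + 1 else c) n = n + move.countP p := by
  induction move generalizing n with
  | nil => simp
  | cons a t ih =>
    simp only [List.foldl_cons, List.countP_cons, ih]
    split_ifs <;> push_cast <;> ring

-- A's keep-decision equals B's keep-decision
lemma pv_keep_eq (move : List (Int × Int × Int × Int × Int)) :
    (if move.length == 1 then true
     else (move.foldl (fun c m1 =>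
        if move.any (fun m2 => pvPre m1 == pvSuf m2) then c + 1 else c) (0 : Int)) == 0)
    = pvLegal move := by
  unfold pvLegal
  by_cases h : move.length == 1
  · simp [h]
  · simp only [h, Bool.false_eq_true, if_false, pv_count_foldl, zero_add]
    rw [Bool.eq_iff_iff]
    simp only [beq_iff_eq]
    rw [show ((move.countP fun m1 => move.any fun m2 => pvPre m1 == pvSuf m2 : Int) = 0)
        ↔ (move.countP fun m1 => move.any fun m2 => pvPre m1 == pvSuf m2) = 0 by
      exact_mod_cast Iff.rfl]
    rw [List.countP_eq_zero]
    rw [PySem.Set.isdisjoint_iff]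
    constructor
    · intro hA x hx hx'
      rw [PySem.Set.mem_ofList, List.mem_map] at hx hx'
      obtain ⟨m1, hm1, rfl⟩ := hx
      obtain ⟨m2, hm2, he⟩ := hx'
      exact hA m1 hm1 (List.any_eq_true.mpr ⟨m2, hm2, beq_iff_eq.mpr he.symm⟩)
    · intro hB m1 hm1 hany
      simp only [List.any_eq_true, beq_iff_eq] at hany
      obtain ⟨m2, hm2, he⟩ := hany
      exact hB (pvPre m1)
        (by rw [PySem.Set.mem_ofList]; exact List.mem_map_of_mem hm1)
        (by rw [PySem.Set.mem_ofList]; rw [he]; exact List.mem_map_of_mem hm2)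

-- A's accumulator fold is a filter
lemma pv_fold_filter (moves : List (List (Int × Int × Int × Int × Int)))
    (acc : List (List (Int × Int × Int × Int × Int))) :
    moves.foldl (fun legal_moves move =>
      if move.length == 1 then legal_moves ++ [move]
      else
        let c : Int := move.foldl (fun c m1 =>
          if move.any (fun m2 => pvPre m1 == pvSuf m2) then c + 1 else c) 0
        if c == 0 then legal_moves ++ [move] else legal_moves) acc
    = acc ++ moves.filter pvLegal := by
  induction moves generalizing acc with
  | nil => simp
  | cons move t ih =>
    simp only [List.foldl_cons, List.filter_cons]
    have hk := pv_keep_eq move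
    by_cases h1 : move.length == 1
    · simp only [h1, if_true] at *
      rw [ih, ← hk]
      simp
    · simp only [h1, Bool.false_eq_true, if_false] at hk ⊢
      by_cases hc : (move.foldl (fun c m1 =>
          if move.any (fun m2 => pvPre m1 == pvSuf m2) then c + 1 else c) (0 : Int)) == 0
      · simp only [hc, if_true] at *
        rw [ih, ← hk]
        simp
      · simp only [hc, Bool.false_eq_true, if_false] at *
        rw [ih, ← hk]
        simp

-- ===== VERDICT (by name: the statement is the Claim_ definition above) =====
theorem remove_illegal_moves_spec : Claim_equal_remove_illegal_moves := by
  intro moves _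
  unfold Spec_remove_illegal_moves remove_illegal_moves remove_illegal_moves_alt
  simpa using pv_fold_filter moves []
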